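-- pv_equiv track=rewrite | github.com/Teruru-52/Self-Solving-Rubik-Cube3 | Self_Solving_Rubik_Cube/main/main.py | index_to_e_ep
-- ===== SOURCE A (Python) =====
-- def index_to_e_ep(index):
--     eep = [0] * 4
--     for i in range(4 - 2, -1, -1):
--         eep[i] = index % (4 - i)
--         index //= 4 - i
--         for j in range(i + 1, 4):
--             if eep[j] >= eep[i]:
--                 eep[j] += 1
--     return eep
-- ===== SOURCE B (Python) =====
-- def index_to_e_ep(index):
--     digit = [0] * 4
--     for i in range(4 - 2, -1, -1):
--         digit[i] = index % (4 - i)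
--         index //= 4 - i
--     avail = [0, 1, 2, 3]
--     return [avail.pop(digit[i]) for i in range(4)]
-- ===== Notes on version B (the rewrite author's own statement) =====
-- stated objective: idiomatic
-- what changed: Keeps the same little-endian digit extraction but replaces the 'shift every later entry >= current' rank-adjustment inner loop with a select-and-remove decode popping from a shrinking pool of unused values.
import Mathlib
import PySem

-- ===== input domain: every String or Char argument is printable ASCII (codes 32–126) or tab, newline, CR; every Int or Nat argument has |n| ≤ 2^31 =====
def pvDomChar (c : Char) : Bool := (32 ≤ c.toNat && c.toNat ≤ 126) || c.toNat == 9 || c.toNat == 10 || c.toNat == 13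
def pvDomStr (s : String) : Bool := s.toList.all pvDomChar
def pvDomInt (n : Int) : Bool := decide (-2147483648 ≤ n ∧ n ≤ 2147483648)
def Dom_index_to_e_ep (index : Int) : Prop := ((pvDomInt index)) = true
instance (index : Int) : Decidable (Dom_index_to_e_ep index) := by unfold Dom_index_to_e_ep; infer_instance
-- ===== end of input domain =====

-- B keeps A's digit extraction but builds the permutation by popping from a shrinking
-- pool of unused values instead of shifting already-placed ranks (idiomatic, same cost).

-- ===== PORT A =====
-- transliteration of A: eep = [0]*4; for i in range(2,-1,-1): eep[i]=index%(4-i);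
-- index//=4-i; for j in range(i+1,4): if eep[j]>=eep[i]: eep[j]+=1
def index_to_e_ep (index : Int) : List Int :=
  (((PySem.List.pyRange 2 (-1) (-1)).foldl (fun (st : List Int × Int) i =>
    let eep := PySem.List.pySetD st.1 i (PySem.Int.mod st.2 (4 - i))
    let index := PySem.Int.floordiv st.2 (4 - i)
    let eep := (PySem.List.pyRange (i + 1) 4 1).foldl (fun e j =>
      if PySem.List.pyGetD e j 0 ≥ PySem.List.pyGetD e i 0
      then PySem.List.pySetD e j (PySem.List.pyGetD e j 0 + 1) else e) eep
    (eep, index)) (([0, 0, 0, 0] : List Int), index))).1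

-- ===== PORT B =====
-- transliteration of Source B: same digit loop, then avail = [0,1,2,3];
-- [avail.pop(digit[i]) for i in range(4)]
def index_to_e_ep_alt (index : Int) : List Int :=
  let st := (PySem.List.pyRange 2 (-1) (-1)).foldl (fun (st : List Int × Int) i =>
      (PySem.List.pySetD st.1 i (PySem.Int.mod st.2 (4 - i)),
       PySem.Int.floordiv st.2 (4 - i))) (([0, 0, 0, 0] : List Int), index)
  let digit := st.1
  ((PySem.List.pyRange 0 4 1).foldl (fun (acc : List Int × List Int) i =>
      match PySem.List.pop? acc.2 (PySem.List.pyGetD digit i 0) with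
      | some (v, rest) => (acc.1 ++ [v], rest)
      | none => (acc.1, acc.2)) (([] : List Int), ([0, 1, 2, 3] : List Int))).1

-- ===== PRECONDITION & SPEC =====
def Spec_index_to_e_ep (index : Int) (out : List Int) : Prop := out = index_to_e_ep_alt index
instance (index : Int) (out : List Int) : Decidable (Spec_index_to_e_ep index out) := by unfold Spec_index_to_e_ep; infer_instance

-- ===== CLAIM (what is proved, stated in full; the proofs are below) =====
def Claim_equal_index_to_e_ep : Prop := ∀ (index : Int), Dom_index_to_e_ep index → Spec_index_to_e_ep index (index_to_e_ep index)

-- ===== LEMMAS AND PROOFS =====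

set_option maxHeartbeats 2000000 in
theorem pv_main (index : Int) : index_to_e_ep index = index_to_e_ep_alt index := by
  have hr : PySem.List.pyRange 2 (-1) (-1) = [2, 1, 0] := by decide
  have hr2 : PySem.List.pyRange 0 4 1 = [0, 1, 2, 3] := by decide
  simp only [index_to_e_ep, index_to_e_ep_alt, hr, hr2, List.foldl]
  generalize hq2 : PySem.Int.floordiv index (4 - 2) = q2
  generalize h2 : PySem.Int.mod index (4 - 2) = d2
  generalize hq1 : PySem.Int.floordiv q2 (4 - 1) = q1
  generalize h1 : PySem.Int.mod q2 (4 - 1) = d1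
  generalize h0 : PySem.Int.mod q1 (4 - 0) = d0
  have b2 : (0:Int) ≤ d2 ∧ d2 < 2 := by
    rw [← h2, PySem.Int.mod_eq_emod_of_pos (by norm_num)]
    exact ⟨Int.emod_nonneg _ (by norm_num), Int.emod_lt_of_pos _ (by norm_num)⟩
  have b1 : (0:Int) ≤ d1 ∧ d1 < 3 := by
    rw [← h1, PySem.Int.mod_eq_emod_of_pos (by norm_num)]
    exact ⟨Int.emod_nonneg _ (by norm_num), Int.emod_lt_of_pos _ (by norm_num)⟩
  have b0 : (0:Int) ≤ d0 ∧ d0 < 4 := by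
    rw [← h0, PySem.Int.mod_eq_emod_of_pos (by norm_num)]
    exact ⟨Int.emod_nonneg _ (by norm_num), Int.emod_lt_of_pos _ (by norm_num)⟩
  obtain ⟨b2l, b2u⟩ := b2
  obtain ⟨b1l, b1u⟩ := b1
  obtain ⟨b0l, b0u⟩ := b0
  clear h2 h1 h0 hq2 hq1 hr hr2
  interval_cases d2 <;> interval_cases d1 <;> interval_cases d0 <;> decide

-- ===== VERDICT (by name: the statement is the Claim_ definition above) =====
theorem index_to_e_ep_spec : Claim_equal_index_to_e_ep := by
  intro index _
  exact pv_main index
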